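-- pv_equiv track=rewrite | github.com/badarislam94/2614404-PythonAssignment | islam.py | abbreviations_generator
-- ===== SOURCE A (Python) =====
-- def calculating_score(abb, name_list, cost_map):
--     first, last, score = "", "", 0
--     for i in name_list:
--         if len(i) > 1:
--             last += i[-1]
--         first += i[0]
--
--     for j in abb[1:]:
--         if j in first:
--             score += 0
--             first = first[first.index(j):]
--
--         elif j in last:
--             if j == "E":
--                 score += 20
--             else:
--                 score += 5
--             last = last[last.index(j):]
--         else:
--             l = []
--             for i in name_list:
--                 if j in i:
--                     l.append(min(i.index(j), 3))
--             if j in cost_map: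
--                 score += min(l) + cost_map[j]
--             else:
--                 # Handle the case when the key is not present in cost_map
--                 score += min(l)
--     return score
--
-- def abbreviations_generator(name_list, values, cost_map):
--     #Generate abbreviations for a given list of words.
--     common_new = set()  # You can replace this with the actual set of common abbreviations if available
--     name = "".join(name_list)
--     n = len(name)
--     abbreviations = set()
--
--     for i in range(1, n):
--         for j in range(i + 1, n):
--             temp = name[0] + name[i] + name[j]
--             if temp in common_new:  # Skip common abbreviations
--                 continue
--             else:
--                 score = calculating_score(temp, name_list, cost_map)
--                 abbreviations.add((temp.upper(), score))
--
--     return abbreviations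
-- ===== SOURCE B (Python) =====
-- def abbreviations_generator(name_list, values, cost_map):
--     # Stateless table-driven scoring: instead of A's truncating first/last scan per
--     # abbreviation, precompute the initials/finals strings and the sets of ordered
--     # character pairs occurring in them; each pair's score is a closed-form case split.
--     name = "".join(name_list)
--     n = len(name)
--     result = set()
--     if n < 3:
--         return result
--     first = "".join(w[0] for w in name_list)
--     last = "".join(w[-1] for w in name_list if len(w) > 1)
--     pf = set((c1, c2) for k, c1 in enumerate(first) for c2 in first[k:])
--     pl = set((c1, c2) for k, c1 in enumerate(last) for c2 in last[k:])
--
--     def other(c):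
--         s = min(min(w.index(c), 3) for w in name_list if c in w)
--         return s + cost_map[c] if c in cost_map else s
--
--     def single(c):
--         if c in first:
--             return 0
--         if c in last:
--             return 20 if c == "E" else 5
--         return other(c)
--
--     def second(c1, c2):
--         if c1 in first:
--             if (c1, c2) in pf:
--                 return 0
--             if c2 in last:
--                 return 20 if c2 == "E" else 5
--             return other(c2)
--         if c1 in last:
--             if c2 in first:
--                 return 0
--             if (c1, c2) in pl:
--                 return 20 if c2 == "E" else 5
--             return other(c2)
--         return single(c2)
--
--     for i in range(1, n):
--         for j in range(i + 1, n):
--             result.add(((name[0] + name[i] + name[j]).upper(),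
--                         single(name[i]) + second(name[i], name[j])))
--     return result
-- ===== Notes on version B (the rewrite author's own statement) =====
-- stated objective: faster
-- what changed: B replaces A's stateful scoring scan (which rebuilds the initials/finals strings for every abbreviation and truncates them character by character) by a stateless table-driven score: the initials/finals strings and the sets of ordered character pairs occurring in them are precomputed once, and each pair's score is a closed-form case split over those tables, removing the per-pair rebuild and scan.
-- outside the precondition, e.g. on abbreviations_generator(['', 'abc'], 0, {}): A raises IndexError, B raises IndexError
import Mathlib
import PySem

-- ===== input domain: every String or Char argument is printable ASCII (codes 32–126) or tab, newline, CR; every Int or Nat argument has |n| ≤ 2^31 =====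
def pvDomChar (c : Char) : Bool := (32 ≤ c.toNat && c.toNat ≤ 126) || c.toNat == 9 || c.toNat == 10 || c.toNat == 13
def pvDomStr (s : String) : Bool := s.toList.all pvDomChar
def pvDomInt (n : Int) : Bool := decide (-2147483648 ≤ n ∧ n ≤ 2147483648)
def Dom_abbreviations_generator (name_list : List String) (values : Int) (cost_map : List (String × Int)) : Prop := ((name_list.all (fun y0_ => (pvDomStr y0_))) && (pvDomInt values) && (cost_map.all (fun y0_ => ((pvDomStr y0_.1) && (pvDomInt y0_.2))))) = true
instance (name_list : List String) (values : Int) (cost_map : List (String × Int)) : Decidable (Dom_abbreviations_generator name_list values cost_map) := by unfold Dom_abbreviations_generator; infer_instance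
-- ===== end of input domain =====

-- B replaces A's stateful truncating first/last scan by a stateless table-driven score
-- (precomputed initials/finals strings and ordered-pair sets); same return value.

-- ===== PORT A =====
-- calculating_score, transliterated; abb is passed as a list of chars.
def pvCalcScore (abb : List Char) (name_list : List String) (cost_map : List (String × Int)) : Int :=
  let fl : List Char × List Char :=
    name_list.foldl (fun p i =>
      (p.1 ++ [(PySem.List.pyGet? i.toList 0).getD ' '],
       if 1 < i.toList.length then p.2 ++ [(PySem.List.pyGet? i.toList (-1)).getD ' '] else p.2))
      ([], [])
  let st : List Char × List Char × Int :=
    (PySem.List.slice abb (some 1) none).foldl (fun st j =>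
      if j ∈ st.1 then (st.1.drop (st.1.idxOf j), st.2.1, st.2.2 + 0)
      else if j ∈ st.2.1 then
        (st.1, (st.2.1).drop ((st.2.1).idxOf j), st.2.2 + (if j = 'E' then 20 else 5))
      else
        let l : List Int := name_list.foldl (fun acc i =>
          if j ∈ i.toList then acc ++ [min ((i.toList.idxOf j : Int)) 3] else acc) []
        -- min(l): the caller only passes chars occurring in some word, so l ≠ []; default unreachable
        let m : Int := (PySem.List.min? l (fun x => x)).getD 0
        match PySem.Dict.get? (PySem.Dict.mk cost_map) (String.ofList [j]) with
        | some v => (st.1, st.2.1, st.2.2 + (m + v))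
        | none => (st.1, st.2.1, st.2.2 + m))
      (fl.1, fl.2, 0)
  st.2.2

def abbreviations_generator (name_list : List String) (values : Int) (cost_map : List (String × Int)) : List (String × Int) :=
  let name : List Char := (name_list.map String.toList).flatten  -- "".join(name_list)
  let n : Int := PySem.List.len name
  (PySem.List.pyRange 1 n 1).foldl (fun abbrs i =>
    (PySem.List.pyRange (i + 1) n 1).foldl (fun abbrs j =>
      let temp : List Char :=
        [(PySem.List.pyGet? name 0).getD ' ', (PySem.List.pyGet? name i).getD ' ',
         (PySem.List.pyGet? name j).getD ' ']
      if String.ofList temp ∈ ([] : List String) then abbrs  -- common_new is the empty set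
      else
        PySem.Set.add abbrs (String.ofList (PySem.Chars.upper temp), pvCalcScore temp name_list cost_map))
      abbrs)
    PySem.Set.empty

-- ===== PORT B =====
-- set((c1, c2) for k, c1 in enumerate(s) for c2 in s[k:])
def pvPairsOf (s : List Char) : List (Char × Char) :=
  PySem.Set.ofList ((PySem.List.enumerate s 0).flatMap (fun kc =>
    (PySem.List.slice s (some kc.1) none).map (fun c2 => (kc.2, c2))))

-- other(c) from Source B; min over a nonempty generator (c occurs in some word), default unreachable
def pvOther (name_list : List String) (cost_map : List (String × Int)) (c : Char) : Int :=
  let s := (PySem.List.min? ((name_list.filter (fun w => decide (c ∈ w.toList))).map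
      (fun w => min ((w.toList.idxOf c : Int)) 3)) (fun x => x)).getD 0
  match PySem.Dict.get? (PySem.Dict.mk cost_map) (String.ofList [c]) with
  | some v => s + v
  | none => s

def pvSingle (name_list : List String) (cost_map : List (String × Int))
    (first last : List Char) (c : Char) : Int :=
  if c ∈ first then 0
  else if c ∈ last then (if c = 'E' then 20 else 5)
  else pvOther name_list cost_map c

def pvSecond (name_list : List String) (cost_map : List (String × Int))
    (first last : List Char) (pf pl : List (Char × Char)) (c1 c2 : Char) : Int :=
  if c1 ∈ first then
    (if (c1, c2) ∈ pf then 0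
     else if c2 ∈ last then (if c2 = 'E' then 20 else 5)
     else pvOther name_list cost_map c2)
  else if c1 ∈ last then
    (if c2 ∈ first then 0
     else if (c1, c2) ∈ pl then (if c2 = 'E' then 20 else 5)
     else pvOther name_list cost_map c2)
  else pvSingle name_list cost_map first last c2

def abbreviations_generator_alt (name_list : List String) (values : Int) (cost_map : List (String × Int)) : List (String × Int) :=
  let name : List Char := (name_list.map String.toList).flatten
  let n : Int := PySem.List.len name
  if n < 3 then PySem.Set.empty
  else
    let first : List Char := name_list.map (fun w => (PySem.List.pyGet? w.toList 0).getD ' ')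
    let last : List Char := (name_list.filter (fun w => decide (1 < w.toList.length))).map
      (fun w => (PySem.List.pyGet? w.toList (-1)).getD ' ')
    let pf := pvPairsOf first
    let pl := pvPairsOf last
    (PySem.List.pyRange 1 n 1).foldl (fun res i =>
      (PySem.List.pyRange (i + 1) n 1).foldl (fun res j =>
        let c1 := (PySem.List.pyGet? name i).getD ' '
        let c2 := (PySem.List.pyGet? name j).getD ' '
        PySem.Set.add res
          (String.ofList (PySem.Chars.upper ([(PySem.List.pyGet? name 0).getD ' '] ++ [c1] ++ [c2])),
           pvSingle name_list cost_map first last c1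
             + pvSecond name_list cost_map first last pf pl c1 c2)) res)
      PySem.Set.empty

-- ===== PRECONDITION & SPEC =====
-- Pre_ excludes exactly the inputs on which A raises IndexError: an empty word in
-- name_list while the joined name has length ≥ 3 (so the scoring helper runs and hits ""[0]).
def Pre_abbreviations_generator (name_list : List String) (values : Int) (cost_map : List (String × Int)) : Prop :=
  ¬ ("" ∈ name_list ∧ 3 ≤ ((name_list.map String.toList).flatten).length)
instance (name_list : List String) (values : Int) (cost_map : List (String × Int)) : Decidable (Pre_abbreviations_generator name_list values cost_map) := by unfold Pre_abbreviations_generator; infer_instance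

def pvWitness_abbreviations_generator : List String × Int × (List (String × Int)) :=
  (["ab", "c"], 0, [("b", 2)])

def Spec_abbreviations_generator (name_list : List String) (values : Int) (cost_map : List (String × Int)) (out : List (String × Int)) : Prop := out = abbreviations_generator_alt name_list values cost_map
instance (name_list : List String) (values : Int) (cost_map : List (String × Int)) (out : List (String × Int)) : Decidable (Spec_abbreviations_generator name_list values cost_map out) := by unfold Spec_abbreviations_generator; infer_instance

-- ===== CLAIM (what is proved, stated in full; the proofs are below) =====
def Claim_equal_abbreviations_generator : Prop := ∀ (name_list : List String) (values : Int) (cost_map : List (String × Int)), Dom_abbreviations_generator name_list values cost_map → Pre_abbreviations_generator name_list values cost_map → Spec_abbreviations_generator name_list values cost_map (abbreviations_generator name_list values cost_map)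

-- ===== LEMMAS AND PROOFS =====

-- one step of A's scoring loop, as a function (proof-only helper)
def pvStepA (name_list : List String) (cost_map : List (String × Int)) (c : Char)
    (first last : List Char) : Int × List Char × List Char :=
  if c ∈ first then (0, first.drop (first.idxOf c), last)
  else if c ∈ last then ((if c = 'E' then 20 else 5), first, last.drop (last.idxOf c))
  else (pvOther name_list cost_map c, first, last)

-- A's first/last building loop equals B's two comprehensions
theorem pv_first_last (name_list : List String) :
    name_list.foldl (fun p i =>
      (p.1 ++ [(PySem.List.pyGet? i.toList 0).getD ' '],
       if 1 < i.toList.length then p.2 ++ [(PySem.List.pyGet? i.toList (-1)).getD ' '] else p.2))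
      ([], [])
    = (name_list.map (fun w => (PySem.List.pyGet? w.toList 0).getD ' '),
       (name_list.filter (fun w => decide (1 < w.toList.length))).map
         (fun w => (PySem.List.pyGet? w.toList (-1)).getD ' ')) := by
  rw [PySem.List.foldl_prod_mk (f := fun acc (i : String) => acc ++ [(PySem.List.pyGet? i.toList 0).getD ' '])
      (g := fun acc (i : String) => if 1 < i.toList.length then acc ++ [(PySem.List.pyGet? i.toList (-1)).getD ' '] else acc)]
  rw [PySem.List.foldl_append_singleton_eq_map, PySem.List.foldl_append_ite (p := fun w : String => 1 < w.toList.length)]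
  simp

-- one step of A's scoring loop is pvStepA
theorem pv_step_eq (name_list : List String) (cost_map : List (String × Int))
    (first last : List Char) (sc : Int) (j : Char) :
    (if j ∈ first then (first.drop (first.idxOf j), last, sc + 0)
      else if j ∈ last then
        (first, last.drop (last.idxOf j), sc + (if j = 'E' then 20 else 5))
      else
        let l : List Int := name_list.foldl (fun acc i =>
          if j ∈ i.toList then acc ++ [min ((i.toList.idxOf j : Int)) 3] else acc) []
        let m : Int := (PySem.List.min? l (fun x => x)).getD 0
        match PySem.Dict.get? (PySem.Dict.mk cost_map) (String.ofList [j]) with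
        | some v => (first, last, sc + (m + v))
        | none => (first, last, sc + m))
    = ((pvStepA name_list cost_map j first last).2.1,
       (pvStepA name_list cost_map j first last).2.2,
       sc + (pvStepA name_list cost_map j first last).1) := by
  unfold pvStepA pvOther
  split_ifs with h1 h2 h3
  · simp
  · simp
  · simp
  · dsimp only
    rcases PySem.Dict.get? (PySem.Dict.mk cost_map) (String.ofList [j]) with _ | v <;>
      simp [PySem.List.foldl_append_ite (p := fun i : String => j ∈ i.toList)
        (f := fun i : String => min ((i.toList.idxOf j : Int)) 3)]

-- idxOf picks the first occurrence: it is ≤ any index holding the element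
theorem pv_idxOf_le (s : List Char) (k : Nat) (hk : k < s.length) : s.idxOf s[k] ≤ k := by
  induction s generalizing k with
  | nil => simp at hk
  | cons a t ih =>
    cases k with
    | zero => simp
    | succ m =>
      have hm : m < t.length := by simpa using hk
      simp only [List.getElem_cons_succ]
      rw [List.idxOf_cons]
      by_cases h : a == t[m]
      · simp [h]
      · simp only [h, cond_false]
        have := ih m hm
        omega

-- membership in the precomputed ordered-pair set
theorem mem_pvPairsOf (s : List Char) (c1 c2 : Char) :
    (c1, c2) ∈ pvPairsOf s ↔ c1 ∈ s ∧ c2 ∈ s.drop (s.idxOf c1) := by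
  unfold pvPairsOf
  rw [PySem.Set.mem_ofList, List.mem_flatMap]
  constructor
  · rintro ⟨kc, hkc, hmem⟩
    rw [PySem.List.mem_enumerate_iff] at hkc
    obtain ⟨k, hk, rfl⟩ := hkc
    simp only [List.mem_map] at hmem
    obtain ⟨c2', hc2', heq⟩ := hmem
    injection heq with e1 e2
    subst e1; subst e2
    rw [show ((0 : Int) + (k : Int)) = ((k : Nat) : Int) by ring,
        PySem.List.slice_from_natCast] at hc2'
    refine ⟨List.getElem_mem hk, ?_⟩
    have hle : s.idxOf s[k] ≤ k := pv_idxOf_le s k hk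
    have hdd : s.drop k = (s.drop (s.idxOf s[k])).drop (k - s.idxOf s[k]) := by
      rw [List.drop_drop]
      congr 1
      omega
    rw [hdd] at hc2'
    exact List.mem_of_mem_drop hc2'
  · rintro ⟨h1, h2⟩
    refine ⟨((0 : Int) + (s.idxOf c1 : Int), c1), ?_, ?_⟩
    · rw [PySem.List.mem_enumerate_iff]
      exact ⟨s.idxOf c1, List.idxOf_lt_length_of_mem h1,
        by rw [List.getElem_idxOf (List.idxOf_lt_length_of_mem h1)]⟩
    · simp only [List.mem_map]
      refine ⟨c2, ?_, rfl⟩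
      dsimp only
      rw [show ((0 : Int) + (s.idxOf c1 : Int)) = ((s.idxOf c1 : Nat) : Int) by ring,
          PySem.List.slice_from_natCast]
      exact h2

-- the score of A's step is B's single()
theorem pv_single_eq (name_list : List String) (cost_map : List (String × Int))
    (first last : List Char) (c : Char) :
    (pvStepA name_list cost_map c first last).1 = pvSingle name_list cost_map first last c := by
  unfold pvStepA pvSingle
  split_ifs <;> rfl

-- the score of A's second step (from the state left by the first) is B's second()
theorem pv_second_eq (name_list : List String) (cost_map : List (String × Int))
    (first last : List Char) (c1 c2 : Char) :
    (pvStepA name_list cost_map c2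
        (pvStepA name_list cost_map c1 first last).2.1
        (pvStepA name_list cost_map c1 first last).2.2).1
      = pvSecond name_list cost_map first last (pvPairsOf first) (pvPairsOf last) c1 c2 := by
  by_cases h1 : c1 ∈ first
  · have hstate : (pvStepA name_list cost_map c1 first last).2
        = (first.drop (first.idxOf c1), last) := by unfold pvStepA; rw [if_pos h1]
    rw [show (pvStepA name_list cost_map c1 first last).2.1 = first.drop (first.idxOf c1) by rw [hstate],
        show (pvStepA name_list cost_map c1 first last).2.2 = last by rw [hstate]]
    unfold pvStepA pvSecond
    rw [if_pos h1]
    by_cases h2 : c2 ∈ first.drop (first.idxOf c1)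
    · rw [if_pos h2, if_pos ((mem_pvPairsOf first c1 c2).mpr ⟨h1, h2⟩)]
    · rw [if_neg h2, if_neg (fun hp => h2 ((mem_pvPairsOf first c1 c2).mp hp).2)]
      split_ifs <;> rfl
  · by_cases h2 : c1 ∈ last
    · have hstate : (pvStepA name_list cost_map c1 first last).2
          = (first, last.drop (last.idxOf c1)) := by
        unfold pvStepA; rw [if_neg h1, if_pos h2]
      rw [show (pvStepA name_list cost_map c1 first last).2.1 = first by rw [hstate],
          show (pvStepA name_list cost_map c1 first last).2.2 = last.drop (last.idxOf c1) by rw [hstate]]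
      unfold pvStepA pvSecond
      rw [if_neg h1, if_pos h2]
      by_cases h3 : c2 ∈ first
      · rw [if_pos h3, if_pos h3]
      · rw [if_neg h3, if_neg h3]
        by_cases h4 : c2 ∈ last.drop (last.idxOf c1)
        · rw [if_pos h4, if_pos ((mem_pvPairsOf last c1 c2).mpr ⟨h2, h4⟩)]
        · rw [if_neg h4, if_neg (fun hp => h4 ((mem_pvPairsOf last c1 c2).mp hp).2)]
    · have hstate : (pvStepA name_list cost_map c1 first last).2 = (first, last) := by
        unfold pvStepA; rw [if_neg h1, if_neg h2]
      rw [show (pvStepA name_list cost_map c1 first last).2.1 = first by rw [hstate],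
          show (pvStepA name_list cost_map c1 first last).2.2 = last by rw [hstate]]
      unfold pvSecond
      rw [if_neg h1, if_neg h2, ← pv_single_eq]

-- A's score of a 3-char abbreviation is B's single + second
theorem pv_calc_eq (name_list : List String) (cost_map : List (String × Int)) (c0 c1 c2 : Char) :
    pvCalcScore [c0, c1, c2] name_list cost_map
      = pvSingle name_list cost_map
          (name_list.map (fun w => (PySem.List.pyGet? w.toList 0).getD ' '))
          ((name_list.filter (fun w => decide (1 < w.toList.length))).map
            (fun w => (PySem.List.pyGet? w.toList (-1)).getD ' ')) c1
        + pvSecond name_list cost_map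
            (name_list.map (fun w => (PySem.List.pyGet? w.toList 0).getD ' '))
            ((name_list.filter (fun w => decide (1 < w.toList.length))).map
              (fun w => (PySem.List.pyGet? w.toList (-1)).getD ' '))
            (pvPairsOf (name_list.map (fun w => (PySem.List.pyGet? w.toList 0).getD ' ')))
            (pvPairsOf ((name_list.filter (fun w => decide (1 < w.toList.length))).map
              (fun w => (PySem.List.pyGet? w.toList (-1)).getD ' '))) c1 c2 := by
  unfold pvCalcScore
  dsimp only
  rw [pv_first_last, PySem.List.slice_from_one]
  simp only [List.tail_cons, List.foldl_cons, List.foldl_nil]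
  rw [pv_step_eq, pv_step_eq]
  dsimp only
  rw [pv_single_eq, pv_second_eq]
  omega

-- ===== VERDICT (by name: the statement is the Claim_ definition above) =====
theorem abbreviations_generator_spec : Claim_equal_abbreviations_generator := by
  intro name_list values cost_map _hdom _hpre
  unfold Spec_abbreviations_generator abbreviations_generator abbreviations_generator_alt
  dsimp only
  by_cases h3 : PySem.List.len ((name_list.map String.toList).flatten) < 3
  · rw [if_pos h3]
    rw [PySem.List.len_eq] at h3
    have h2 : ((name_list.map String.toList).flatten).length = 0 ∨
        ((name_list.map String.toList).flatten).length = 1 ∨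
        ((name_list.map String.toList).flatten).length = 2 := by omega
    rcases h2 with h2 | h2 | h2 <;> rw [PySem.List.len_eq, h2]
    · rw [PySem.List.pyRange_one_eq_nil (by norm_num)]
      rfl
    · rw [PySem.List.pyRange_one_eq_nil (by norm_num)]
      rfl
    · rw [PySem.List.pyRange_one_cons (by norm_num), PySem.List.pyRange_one_eq_nil (by norm_num)]
      simp only [List.foldl_cons, List.foldl_nil]
      rw [show (1 : Int) + 1 = 2 by norm_num, PySem.List.pyRange_one_eq_nil (by norm_num)]
      rfl
  · rw [if_neg h3]
    congr 1
    funext abbrs i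
    congr 1
    funext abbrs j
    simp only [List.not_mem_nil, if_false]
    rw [pv_calc_eq]
    rfl
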